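-- pv_equiv track=rewrite | github.com/ddodon/BOJ | 백준/Gold/17140. 이차원 배열과 연산/이차원 배열과 연산.py | r_cal
-- ===== SOURCE A (Python) =====
-- from collections import defaultdict
--
-- def r_cal(arr):
--     new_arr = [[] for _ in range(len(arr))]
--     for i in range(len(arr)):
--         dic = defaultdict(int)
--         for j in range(len(arr[i])):
--             if arr[i][j] == 0: continue
--             dic[arr[i][j]] += 1
--         tmp = []
--         for (k, v) in dic.items():
--             tmp.append((k, v))
--         tmp.sort(key=lambda x: (x[1], x[0]))
--         for (k, v) in tmp:
--             new_arr[i].append(k)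
--             new_arr[i].append(v)
--     for i in range(len(new_arr)):
--         if len(new_arr[i]) > 100:
--             new_arr[i] = new_arr[:100]
--     return new_arr
-- ===== SOURCE B (Python) =====
-- from itertools import groupby
--
-- def r_cal(arr):
--     result = []
--     for row in arr:
--         pairs = [(k, sum(1 for _ in g)) for k, g in groupby(sorted(x for x in row if x != 0))]
--         pairs.sort(key=lambda p: (p[1], p[0]))
--         result.append([x for p in pairs for x in p][:100])
--     return result
-- ===== Notes on version B (the rewrite author's own statement) =====
-- stated objective: alternative
-- what changed: Per row, B sorts the nonzero values and builds (value,count) pairs from the sorted runs with itertools.groupby instead of counting into a defaultdict, then sorts by (count,value) and flattens, truncating each row to 100 entries (the intended per-row cap) instead of A's accidental assignment of the sliced outer list. Pre_ excludes inputs where some row has more than 50 distinct nonzero values: there A's truncation bug assigns new_arr[:100] (the outer list sliced), returning a nested list of rows that is not a value of type list[list[int]], while B truncates the row itself to 100 entries.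
import Mathlib
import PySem

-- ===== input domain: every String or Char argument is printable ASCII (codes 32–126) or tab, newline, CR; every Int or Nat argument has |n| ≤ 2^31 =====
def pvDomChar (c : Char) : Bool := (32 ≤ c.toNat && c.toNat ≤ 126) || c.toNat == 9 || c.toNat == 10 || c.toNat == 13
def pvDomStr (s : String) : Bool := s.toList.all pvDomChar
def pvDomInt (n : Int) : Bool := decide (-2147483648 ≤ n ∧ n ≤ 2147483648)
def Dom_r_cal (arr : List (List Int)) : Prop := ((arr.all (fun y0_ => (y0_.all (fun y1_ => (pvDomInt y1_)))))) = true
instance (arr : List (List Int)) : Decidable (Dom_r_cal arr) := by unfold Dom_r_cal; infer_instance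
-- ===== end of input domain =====

-- B replaces A's per-row defaultdict counting by sort + run-length grouping and truncates
-- each row to 100 entries (A's truncation instead assigns the sliced OUTER list, a value
-- outside list[list[int]]; Pre_ excludes the inputs reaching that branch).

-- ===== PORT A =====
def r_cal (arr : List (List Int)) : List (List Int) :=
  let new_arr := arr.map (fun row =>
    let dic := row.foldl (fun d x => if x == 0 then d else d.insert x (d.getD x 0 + 1))
      PySem.Dict.empty
    let tmp := dic.items.foldl (fun acc kv => acc ++ [(kv.1, kv.2)]) []
    let tmp := PySem.List.sorted tmp (fun p => toLex (p.2, p.1))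
    tmp.foldl (fun acc kv => acc ++ [kv.1, kv.2]) ([] : List Int))
  -- final Python loop: 'if len(new_arr[i]) > 100: new_arr[i] = new_arr[:100]' assigns a
  -- LIST OF ROWS, which leaves the type List Int; those inputs are outside Pre_r_cal, and
  -- on that (excluded) branch this port leaves the row unchanged.
  new_arr.map (fun row => if row.length > 100 then row else row)

-- ===== PORT B =====
-- itertools.groupby over a sorted run: (value, run length) pairs
def bGroupPairs : List Int → List (Int × Int)
  | [] => []
  | x :: xs =>
    (x, ((xs.takeWhile (· == x)).length : Int) + 1) :: bGroupPairs (xs.dropWhile (· == x))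
  termination_by l => l.length
  decreasing_by simpa using Nat.lt_succ_of_le (List.length_dropWhile_le _ _)

def r_cal_alt (arr : List (List Int)) : List (List Int) :=
  arr.map (fun row =>
    let pairs := bGroupPairs (PySem.List.sorted (row.filter (fun x => !(x == 0))) (fun x => x))
    let pairs := PySem.List.sorted pairs (fun p => toLex (p.2, p.1))
    (pairs.flatMap (fun p => [p.1, p.2])).take 100)

-- ===== PRECONDITION & SPEC =====
-- Pre_ excludes inputs where some row has more than 50 distinct nonzero values: there A's
-- truncation assigns new_arr[:100] (the outer list sliced), returning a nested list of rows
-- that is not a value of type list[list[int]]; B truncates the row itself to 100 entries.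
def Pre_r_cal (arr : List (List Int)) : Prop :=
  ∀ row ∈ arr, (PySem.Set.ofList (row.filter (fun x => !(x == 0)))).length ≤ 50
instance (arr : List (List Int)) : Decidable (Pre_r_cal arr) := by unfold Pre_r_cal; infer_instance

def pvWitness_r_cal : List (List Int) := [[1, 2, 2, 0], [], [5, 0, 5]]

def Spec_r_cal (arr : List (List Int)) (out : List (List Int)) : Prop := out = r_cal_alt arr
instance (arr : List (List Int)) (out : List (List Int)) : Decidable (Spec_r_cal arr out) := by unfold Spec_r_cal; infer_instance

-- ===== CLAIM (what is proved, stated in full; the proofs are below) =====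
def Claim_equal_r_cal : Prop := ∀ (arr : List (List Int)), Dom_r_cal arr → Pre_r_cal arr → Spec_r_cal arr (r_cal arr)

-- ===== LEMMAS AND PROOFS =====

-- the sort key (count, value) is injective on pairs
lemma pvKeyInj : Function.Injective (fun p : Int × Int => toLex (p.2, p.1)) := by
  intro a b hab
  have h1 : a.2 = b.2 := congrArg (fun q => (ofLex q).1) hab
  have h2 : a.1 = b.1 := congrArg (fun q => (ofLex q).2) hab
  exact Prod.ext h2 h1

-- run-length grouping of a nondecreasing list = (k, count k l) over a nodup key list
-- whose members are exactly the members of l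
theorem bGroupPairs_spec : (l : List Int) → l.Pairwise (· ≤ ·) →
    ∃ ks : List Int, ks.Nodup ∧ (∀ k, k ∈ ks ↔ k ∈ l) ∧
      bGroupPairs l = ks.map (fun k => (k, (l.count k : Int)))
  | [], _ => ⟨[], by simp, by simp, by simp [bGroupPairs]⟩
  | x :: xs, h => by
    have hx : ∀ y ∈ xs, x ≤ y := (List.pairwise_cons.mp h).1
    have hxs : xs.Pairwise (· ≤ ·) := (List.pairwise_cons.mp h).2
    have hd : (xs.dropWhile (· == x)).Pairwise (· ≤ ·) :=
      hxs.sublist (List.dropWhile_sublist _)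
    have hgt : ∀ y ∈ xs.dropWhile (· == x), x < y := by
      cases hd0 : xs.dropWhile (· == x) with
      | nil => simp
      | cons y0 d' =>
        have hne : (xs.dropWhile (· == x)) ≠ [] := by simp [hd0]
        have hy0 : ((xs.dropWhile (· == x)).head hne == x) = false :=
          List.head_dropWhile_not (· == x) hne
        have hy0x : y0 ≠ x := by
          have : (xs.dropWhile (· == x)).head hne = y0 := by simp [hd0]
          simpa [this] using hy0
        have hy0mem : y0 ∈ xs := (List.dropWhile_sublist (· == x)).mem (by simp [hd0])
        have hxy0 : x < y0 := lt_of_le_of_ne (hx y0 hy0mem) (Ne.symm hy0x)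
        intro y hy
        rcases List.mem_cons.mp hy with rfl | hy'
        · exact hxy0
        · have hled : y0 ≤ y := by
            have := hd0 ▸ hd
            exact (List.pairwise_cons.mp this).1 y hy'
          exact lt_of_lt_of_le hxy0 hled
    have hxnd : x ∉ xs.dropWhile (· == x) := fun hm => lt_irrefl x (hgt x hm)
    obtain ⟨ks, hnd, hmem, heq⟩ := bGroupPairs_spec (xs.dropWhile (· == x)) hd
    have hr : ∀ y ∈ xs.takeWhile (· == x), y = x := fun y hy => by
      simpa using List.mem_takeWhile_imp hy
    have hsplit : xs.takeWhile (· == x) ++ xs.dropWhile (· == x) = xs :=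
      List.takeWhile_append_dropWhile
    refine ⟨x :: ks, ?_, ?_, ?_⟩
    · refine List.nodup_cons.mpr ⟨fun hxk => hxnd ((hmem x).1 hxk), hnd⟩
    · intro k
      simp only [List.mem_cons, hmem]
      constructor
      · rintro (rfl | hk)
        · exact Or.inl rfl
        · exact Or.inr ((List.dropWhile_sublist (· == x)).mem hk)
      · rintro (rfl | hk)
        · exact Or.inl rfl
        · rw [← hsplit] at hk
          rcases List.mem_append.mp hk with hk | hk
          · exact Or.inl (hr k hk)
          · exact Or.inr hk
    · rw [bGroupPairs, heq, List.map_cons]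
      congr 1
      · have h1 : (xs.takeWhile (· == x)).count x = (xs.takeWhile (· == x)).length :=
          List.count_eq_length.mpr (fun b hb => (hr b hb).symm)
        have h2 : (xs.dropWhile (· == x)).count x = 0 :=
          List.count_eq_zero.mpr hxnd
        have hxc : xs.count x = (xs.takeWhile (· == x)).length := by
          conv_lhs => rw [← hsplit]
          rw [List.count_append, h1, h2]
          omega
        have hcx : (x :: xs).count x = (xs.takeWhile (· == x)).length + 1 := by
          rw [List.count_cons_self, hxc]
        simp [hcx]
      · apply List.map_congr_left
        intro k hk
        have hkd : k ∈ xs.dropWhile (· == x) := (hmem k).1 hk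
        have hkx : k ≠ x := fun hkx => lt_irrefl x (hkx ▸ hgt k hkd)
        have h0 : (xs.takeWhile (· == x)).count k = 0 :=
          List.count_eq_zero.mpr (fun hm => hkx (hr k hm))
        have hxc : xs.count k = (xs.dropWhile (· == x)).count k := by
          conv_lhs => rw [← hsplit]
          rw [List.count_append, h0]
          omega
        have hc : (x :: xs).count k = (xs.dropWhile (· == x)).count k := by
          rw [List.count_cons]
          simp [Ne.symm hkx, hxc]
        simp [hc]
  termination_by l => l.length
  decreasing_by simpa using Nat.lt_succ_of_le (List.length_dropWhile_le _ _)

lemma pvLenFlat (ps : List (Int × Int)) :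
    (ps.flatMap (fun p => [p.1, p.2])).length = 2 * ps.length := by
  induction ps with
  | nil => simp
  | cons p ps ih => simp [ih]; omega

-- one row: A's dict pass equals B's sort-group pass, including the truncation
lemma pvRow (row : List Int)
    (hb : (PySem.Set.ofList (row.filter (fun x => !(x == 0)))).length ≤ 50) :
    (PySem.List.sorted
        ((row.foldl (fun d x => if x == 0 then d else d.insert x (d.getD x 0 + 1))
            PySem.Dict.empty).items.foldl (fun acc kv => acc ++ [(kv.1, kv.2)]) [])
        (fun p => toLex (p.2, p.1))).foldl (fun acc kv => acc ++ [kv.1, kv.2]) []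
    = ((PySem.List.sorted
          (bGroupPairs (PySem.List.sorted (row.filter (fun x => !(x == 0))) (fun x => x)))
          (fun p => toLex (p.2, p.1))).flatMap (fun p => [p.1, p.2])).take 100 := by
  have hdic : row.foldl (fun d x => if x == 0 then d else d.insert x (d.getD x 0 + 1))
      PySem.Dict.empty = PySem.Dict.counter (row.filter (fun x => !(x == 0))) := by
    rw [← PySem.Dict.foldl_insert_getD_add_one_eq_counter, List.foldl_filter]
    congr 1
    funext d x
    by_cases h : x = 0 <;> simp [h]
  have hitems : (PySem.Dict.counter (row.filter (fun x => !(x == 0)))).items.foldl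
      (fun acc kv => acc ++ [(kv.1, kv.2)]) []
      = (PySem.Set.ofList (row.filter (fun x => !(x == 0)))).map
          (fun k => (k, ((row.filter (fun x => !(x == 0))).count k : Int))) := by
    rw [PySem.List.foldl_append_singleton_eq_map]
    simp [PySem.Dict.items_counter]
  obtain ⟨ks, hnd, hmem, heq⟩ :=
    bGroupPairs_spec (PySem.List.sorted (row.filter (fun x => !(x == 0))) (fun x => x))
      (PySem.List.sorted_pairwise _ _)
  have hperm : (PySem.List.sorted (row.filter (fun x => !(x == 0))) (fun x => x)).Perm
      (row.filter (fun x => !(x == 0))) := PySem.List.sorted_perm _ _ _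
  have heq' : bGroupPairs (PySem.List.sorted (row.filter (fun x => !(x == 0))) (fun x => x))
      = ks.map (fun k => (k, ((row.filter (fun x => !(x == 0))).count k : Int))) := by
    rw [heq]
    exact List.map_congr_left (fun k _ => by rw [hperm.count_eq])
  have hkperm : ks.Perm (PySem.Set.ofList (row.filter (fun x => !(x == 0)))) := by
    rw [List.perm_ext_iff_of_nodup hnd (PySem.Set.nodup_ofList _)]
    intro a
    rw [hmem a, PySem.Set.mem_ofList, hperm.mem_iff]
  have hpairperm : (ks.map (fun k => (k, ((row.filter (fun x => !(x == 0))).count k : Int)))).Perm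
      ((PySem.Set.ofList (row.filter (fun x => !(x == 0)))).map
        (fun k => (k, ((row.filter (fun x => !(x == 0))).count k : Int)))) := hkperm.map _
  have hginj : Function.Injective
      (fun k : Int => (k, ((row.filter (fun x => !(x == 0))).count k : Int))) := by
    intro a b hab
    exact congrArg Prod.fst hab
  have hndmap : (ks.map (fun k => (k, ((row.filter (fun x => !(x == 0))).count k : Int)))).Nodup :=
    hnd.map hginj
  have hsorted_eq : PySem.List.sorted
      ((PySem.Set.ofList (row.filter (fun x => !(x == 0)))).map
        (fun k => (k, ((row.filter (fun x => !(x == 0))).count k : Int))))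
      (fun p => toLex (p.2, p.1))
      = PySem.List.sorted
          (ks.map (fun k => (k, ((row.filter (fun x => !(x == 0))).count k : Int))))
          (fun p => toLex (p.2, p.1)) := by
    apply PySem.List.sorted_eq_of_perm_of_pairwise_lt
    · exact (PySem.List.sorted_perm _ _ _).trans hpairperm
    · have hle := PySem.List.sorted_pairwise
        (ks.map (fun k => (k, ((row.filter (fun x => !(x == 0))).count k : Int))))
        (fun p => toLex (p.2, p.1))
      have hndsort : (PySem.List.sorted
          (ks.map (fun k => (k, ((row.filter (fun x => !(x == 0))).count k : Int))))
          (fun p => toLex (p.2, p.1))).Nodup :=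
        (PySem.List.sorted_perm _ _ _).nodup_iff.mpr hndmap
      have hne := List.Pairwise.imp₂ (fun a b h1 h2 => And.intro h1 h2) hle hndsort
      exact hne.imp (fun {a b} hab =>
        lt_of_le_of_ne hab.1 (fun hk => hab.2 (pvKeyInj hk)))
  have hlen : (PySem.List.sorted
      (ks.map (fun k => (k, ((row.filter (fun x => !(x == 0))).count k : Int))))
      (fun p => toLex (p.2, p.1))).length ≤ 50 := by
    rw [(PySem.List.sorted_perm _ _ _).length_eq, List.length_map, hkperm.length_eq]
    exact hb
  rw [hdic, hitems, heq', PySem.List.foldl_append_eq_flatMap, hsorted_eq]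
  rw [List.take_of_length_le]
  · simp
  · rw [pvLenFlat]; omega

-- ===== VERDICT (by name: the statement is the Claim_ definition above) =====
theorem r_cal_spec : Claim_equal_r_cal := by
  intro arr _ hpre
  unfold Spec_r_cal r_cal r_cal_alt
  simp only [ite_self, List.map_map]
  apply List.map_congr_left
  intro row hrow
  simpa using pvRow row (hpre row hrow)
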